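-- pv_equiv track=rewrite | github.com/vishal13may/Artificial-Intelligence | Resolution/hw2cs561s2017.py | is_satisfiable
-- ===== SOURCE A (Python) =====
-- def is_satisfiable(clause, model):
--     false_count = 0
--     for symbol in clause:
--         if symbol in model:
--             if model[symbol]:
--                 return True
--             else:
--                 false_count += 1
--
--     if false_count == len(clause):
--         return False
--
--     return None
-- ===== SOURCE B (Python) =====
-- def is_satisfiable(clause, model):
--     if any(model.get(s) for s in clause):
--         return True
--     if all(s in model and not model[s] for s in clause):
--         return False
--     return None
-- ===== Notes on version B (the rewrite author's own statement) =====
-- stated objective: idiomatic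
-- what changed: Replaced the single accumulating loop (early return plus false_count compared to len(clause) afterwards) by two independent short-circuiting quantifier passes: any() for a satisfied symbol, then all() for every symbol assigned false.
import Mathlib
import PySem

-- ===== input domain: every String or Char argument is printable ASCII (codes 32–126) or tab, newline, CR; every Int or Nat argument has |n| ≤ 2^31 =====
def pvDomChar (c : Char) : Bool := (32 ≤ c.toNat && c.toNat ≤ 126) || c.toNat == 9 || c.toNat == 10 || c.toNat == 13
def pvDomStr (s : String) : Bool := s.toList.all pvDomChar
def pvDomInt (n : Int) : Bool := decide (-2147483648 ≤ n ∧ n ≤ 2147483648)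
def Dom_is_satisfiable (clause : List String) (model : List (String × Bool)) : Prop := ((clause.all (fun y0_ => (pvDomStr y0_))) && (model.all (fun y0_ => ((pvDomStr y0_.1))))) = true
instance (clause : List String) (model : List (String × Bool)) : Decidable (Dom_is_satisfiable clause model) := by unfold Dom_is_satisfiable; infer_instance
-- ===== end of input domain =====

-- B replaces A's single accumulating loop (early return + false_count vs len check) by two independent short-circuiting quantifier scans (idiomatic decomposition, same cost).


-- ===== PORT A =====
-- A's for-loop: `none` encodes the early `return True`, `some fc` the final false_count
def isSatLoopA (clause : List String) (model : PySem.Dict String Bool) (fc : Int) : Option Int :=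
  match clause with
  | [] => some fc
  | s :: rest =>
    match PySem.Dict.get? model s with
    | some b => if b then none else isSatLoopA rest model (fc + 1)
    | none => isSatLoopA rest model fc

def is_satisfiable (clause : List String) (model : List (String × Bool)) : Option Bool :=
  match isSatLoopA clause (PySem.Dict.mk model) 0 with
  | none => some true
  | some fc => if fc = (clause.length : Int) then some false else none

-- ===== PORT B =====
-- two flat scans: any(model.get(s) for s in clause), then all(s in model and not model[s] for s in clause)
def is_satisfiable_alt (clause : List String) (model : List (String × Bool)) : Option Bool :=
  if clause.any (fun s => PySem.Dict.get? (PySem.Dict.mk model) s == some true) then some true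
  else if clause.all (fun s => PySem.Dict.get? (PySem.Dict.mk model) s == some false) then some false
  else none

-- ===== PRECONDITION & SPEC =====
def Spec_is_satisfiable (clause : List String) (model : List (String × Bool)) (out : Option Bool) : Prop := out = is_satisfiable_alt clause model
instance (clause : List String) (model : List (String × Bool)) (out : Option Bool) : Decidable (Spec_is_satisfiable clause model out) := by unfold Spec_is_satisfiable; infer_instance

-- ===== CLAIM (what is proved, stated in full; the proofs are below) =====
def Claim_equal_is_satisfiable : Prop := ∀ (clause : List String) (model : List (String × Bool)), Dom_is_satisfiable clause model → Spec_is_satisfiable clause model (is_satisfiable clause model)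

-- ===== LEMMAS AND PROOFS =====
theorem isSatLoopA_le (clause : List String) (model : PySem.Dict String Bool) (fc fc' : Int)
    (h : isSatLoopA clause model fc = some fc') : fc' ≤ fc + clause.length := by
  induction clause generalizing fc with
  | nil => simp [isSatLoopA] at h; omega
  | cons s rest ih =>
    simp only [isSatLoopA] at h
    rcases hg : PySem.Dict.get? model s with _ | b
    · rw [hg] at h
      have := ih fc h
      simp only [List.length_cons]; push_cast; omega
    · rw [hg] at h
      cases b
      · simp only [Bool.false_eq_true, if_false] at h
        have := ih (fc + 1) h
        simp only [List.length_cons]; push_cast; omega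
      · simp at h

theorem isSat_main (clause : List String) (model : PySem.Dict String Bool) (fc : Int) :
    (match isSatLoopA clause model fc with
     | none => some true
     | some fc' => if fc' = fc + clause.length then some false else none)
    = (if clause.any (fun s => PySem.Dict.get? model s == some true) then some true
       else if clause.all (fun s => PySem.Dict.get? model s == some false) then some false
       else none) := by
  induction clause generalizing fc with
  | nil => simp [isSatLoopA]
  | cons s rest ih =>
    rcases hg : PySem.Dict.get? model s with _ | b
    · -- symbol absent from the model
      have h := ih fc
      rcases hl : isSatLoopA rest model fc with _ | fc'
      · rw [hl] at h
        have ha : rest.any (fun s => PySem.Dict.get? model s == some true) = true := by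
          by_contra hc
          simp only [Bool.not_eq_true] at hc
          rw [hc] at h; split_ifs at h <;> simp_all
        simp [isSatLoopA, hg, hl, ha]
      · rw [hl] at h
        have hle := isSatLoopA_le rest model fc fc' hl
        have hne : fc' ≠ fc + ((rest.length : Int) + 1) := by omega
        by_cases ha : rest.any (fun s => PySem.Dict.get? model s == some true) = true
        · rw [ha] at h; split_ifs at h <;> simp_all
        · simp only [Bool.not_eq_true] at ha
          simp [isSatLoopA, hg, hl, ha]
          simp [hne]
    · cases b
      · -- symbol assigned false: one more false_count, recurse
        have h := ih (fc + 1)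
        simp only [isSatLoopA, hg, List.any_cons, List.all_cons, List.length_cons,
          Bool.false_eq_true, if_false]
        have key : ∀ o : Option Int,
            (match o with
             | none => some true
             | some fc' => if fc' = fc + ((rest.length : Int) + 1) then some false else none)
          = (match o with
             | none => some true
             | some fc' => if fc' = (fc + 1) + (rest.length : Int) then some false else none) := by
          intro o
          cases o with
          | none => rfl
          | some fc' => exact if_congr (by constructor <;> intro <;> omega) rfl rfl
        push_cast
        rw [key (isSatLoopA rest model (fc + 1))]
        simpa using h
      · -- symbol assigned true: early return on both sides
        simp [isSatLoopA, hg]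

-- ===== VERDICT (by name: the statement is the Claim_ definition above) =====
theorem is_satisfiable_spec : Claim_equal_is_satisfiable := by
  intro clause model _
  unfold Spec_is_satisfiable is_satisfiable is_satisfiable_alt
  simpa using isSat_main clause (PySem.Dict.mk model) 0
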